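-- pv_equiv track=rewrite | github.com/fonttools/fontbakery | Lib/fontbakery/checks/name_length_req.py | compute_rbiz_names
-- ===== SOURCE A (Python) =====
-- def compute_rbiz_names(family, stat_names, rbiz_axes):
--     # Name IDs 1 & 2 in a RBIZ model
--     rbiz_family_names = [
--         n
--         for axis, (n, _) in sorted(stat_names.items(), key=lambda x: x[1][1])
--         if axis not in rbiz_axes
--     ]
--     rbiz_family = " ".join([f"{family}", *rbiz_family_names])
--     rbiz_subfamily_names = [
--         stat_names[axis] for axis in rbiz_axes if axis in stat_names
--     ]
--     rbiz_subfamily = " ".join(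
--         [n for n, _ in sorted(rbiz_subfamily_names, key=lambda x: x[1])]
--     )
--     if rbiz_subfamily == "":
--         rbiz_subfamily = "Regular"
--     return (rbiz_family, rbiz_subfamily)
-- ===== SOURCE B (Python) =====
-- def compute_rbiz_names(family, stat_names, rbiz_axes):
--     # Alternative decomposition: no sorted() calls; each name list is kept
--     # ordered by weight via stable incremental insertion, fusing the
--     # filter and the sort into a single pass.
--     def insort(lst, item):
--         # stable insert: place item before the first strictly greater weight
--         for i, cur in enumerate(lst):
--             if item[1] < cur[1]:
--                 lst.insert(i, item)
--                 return
--         lst.append(item)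
--
--     fam_sorted = []
--     for axis, pair in stat_names.items():
--         if axis not in rbiz_axes:
--             insort(fam_sorted, pair)
--     sub_sorted = []
--     for axis in rbiz_axes:
--         if axis in stat_names:
--             insort(sub_sorted, stat_names[axis])
--     rbiz_family = " ".join([family] + [n for n, _ in fam_sorted])
--     rbiz_subfamily = " ".join(n for n, _ in sub_sorted)
--     if rbiz_subfamily == "":
--         rbiz_subfamily = "Regular"
--     return (rbiz_family, rbiz_subfamily)
-- ===== Notes on version B (the rewrite author's own statement) =====
-- stated objective: alternative
-- what changed: B drops both sorted() calls and both sort-then-filter comprehensions: each name list is built in one pass that fuses the membership filter with a hand-written stable insertion into an always-ordered accumulator.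
import Mathlib
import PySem

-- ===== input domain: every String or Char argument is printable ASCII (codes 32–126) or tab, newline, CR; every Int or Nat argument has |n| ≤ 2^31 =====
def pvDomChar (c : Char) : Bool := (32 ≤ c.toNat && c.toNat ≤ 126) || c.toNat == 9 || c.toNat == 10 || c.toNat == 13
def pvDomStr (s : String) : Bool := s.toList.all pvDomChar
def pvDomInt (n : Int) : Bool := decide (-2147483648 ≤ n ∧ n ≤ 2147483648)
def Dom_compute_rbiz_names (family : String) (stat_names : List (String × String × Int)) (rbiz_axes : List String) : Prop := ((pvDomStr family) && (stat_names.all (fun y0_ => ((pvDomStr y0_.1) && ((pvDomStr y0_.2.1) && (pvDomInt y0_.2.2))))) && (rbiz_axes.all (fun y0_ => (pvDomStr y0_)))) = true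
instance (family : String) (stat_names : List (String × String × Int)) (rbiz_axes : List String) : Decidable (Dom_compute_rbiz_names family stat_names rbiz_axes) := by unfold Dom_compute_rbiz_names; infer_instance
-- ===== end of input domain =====

-- B replaces A's two sorted()+comprehension passes by one fused filter-and-stable-insert pass per name list (alternative decomposition, same values).


-- ===== PORT A =====
-- stat_names is Python's dict: normalize the assoc list by dict insertion semantics once
-- (`[stat_names[axis] for axis in rbiz_axes if axis in stat_names]`: the `in` guard plus
-- the always-succeeding lookup is exactly filterMap get?, the KeyError branch is unreachable).
def compute_rbiz_names (family : String) (stat_names : List (String × String × Int)) (rbiz_axes : List String) : String × String :=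
  let d := PySem.Dict.ofList stat_names
  let rbiz_family_names :=
    ((PySem.List.sorted d.items (fun x => x.2.2) false).filter
      (fun x => !(rbiz_axes.contains x.1))).map (fun x => x.2.1)
  let rbiz_family := PySem.Str.join " " (family :: rbiz_family_names)
  let rbiz_subfamily_names := rbiz_axes.filterMap (fun ax => d.get? ax)
  let rbiz_subfamily :=
    PySem.Str.join " "
      ((PySem.List.sorted rbiz_subfamily_names (fun x => x.2) false).map (fun x => x.1))
  (rbiz_family, if rbiz_subfamily = "" then "Regular" else rbiz_subfamily)

-- ===== PORT B =====
-- Source B's insort: stable insert before the first strictly greater weight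
def pvInsortB (x : String × Int) (acc : List (String × Int)) : List (String × Int) :=
  match acc with
  | [] => [x]
  | y :: ys => if x.2 < y.2 then x :: y :: ys else y :: pvInsortB x ys

def compute_rbiz_names_alt (family : String) (stat_names : List (String × String × Int)) (rbiz_axes : List String) : String × String :=
  let d := PySem.Dict.ofList stat_names
  let famSorted := d.items.foldl
    (fun acc it => if rbiz_axes.contains it.1 then acc else pvInsortB it.2 acc) []
  let subSorted := rbiz_axes.foldl
    (fun acc ax => match d.get? ax with | some v => pvInsortB v acc | none => acc) []
  let rbiz_family := PySem.Str.join " " (family :: famSorted.map (fun x => x.1))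
  let rbiz_subfamily := PySem.Str.join " " (subSorted.map (fun x => x.1))
  (rbiz_family, if rbiz_subfamily = "" then "Regular" else rbiz_subfamily)

-- ===== PRECONDITION & SPEC =====
def Spec_compute_rbiz_names (family : String) (stat_names : List (String × String × Int)) (rbiz_axes : List String) (out : String × String) : Prop := out = compute_rbiz_names_alt family stat_names rbiz_axes
instance (family : String) (stat_names : List (String × String × Int)) (rbiz_axes : List String) (out : String × String) : Decidable (Spec_compute_rbiz_names family stat_names rbiz_axes out) := by unfold Spec_compute_rbiz_names; infer_instance

-- ===== CLAIM (what is proved, stated in full; the proofs are below) =====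
def Claim_equal_compute_rbiz_names : Prop := ∀ (family : String) (stat_names : List (String × String × Int)) (rbiz_axes : List String), Dom_compute_rbiz_names family stat_names rbiz_axes → Spec_compute_rbiz_names family stat_names rbiz_axes (compute_rbiz_names family stat_names rbiz_axes)

-- ===== LEMMAS AND PROOFS =====

lemma pvInsortB_eq (x : String × Int) (acc : List (String × Int)) :
    pvInsortB x acc = PySem.List.insertBy (fun a b => decide (a.2 < b.2)) x acc := by
  induction acc with
  | nil => rfl
  | cons y ys ih => simp [pvInsortB, PySem.List.insertBy, ih]

lemma sorted_eq_foldl {α : Type} (xs : List α) (key : α → Int) :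
    PySem.List.sorted xs key false
      = xs.foldl (fun acc x => PySem.List.insertBy (fun a b => decide (key a < key b)) x acc) [] := by
  rfl

lemma insertBy_front {α : Type} (k : α → Int) (x : α) (zs : List α)
    (h : ∀ z ∈ zs, k x < k z) :
    PySem.List.insertBy (fun a b => decide (k a < k b)) x zs = x :: zs := by
  cases zs with
  | nil => rfl
  | cons z zs' => simp [PySem.List.insertBy, h z (by simp)]

lemma insertBy_filter {α : Type} (k : α → Int) (p : α → Bool) (x : α) (s : List α)
    (hs : s.Pairwise (fun a b => k a ≤ k b)) :
    (PySem.List.insertBy (fun a b => decide (k a < k b)) x s).filter p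
      = if p x then PySem.List.insertBy (fun a b => decide (k a < k b)) x (s.filter p)
        else s.filter p := by
  induction s with
  | nil =>
    by_cases hp : p x <;> simp [PySem.List.insertBy, List.filter, hp]
  | cons y ys ih =>
    rcases List.pairwise_cons.mp hs with ⟨hy, hys⟩
    by_cases hlt : k x < k y
    · have hfront : PySem.List.insertBy (fun a b => decide (k a < k b)) x ((y :: ys).filter p)
          = x :: (y :: ys).filter p := by
        apply insertBy_front
        intro z hz
        have hzmem : z ∈ y :: ys := List.mem_of_mem_filter hz
        rcases List.mem_cons.mp hzmem with h1 | h2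
        · simpa [h1] using hlt
        · exact lt_of_lt_of_le hlt (hy z h2)
      have h1 : PySem.List.insertBy (fun a b => decide (k a < k b)) x (y :: ys)
          = x :: y :: ys := by simp [PySem.List.insertBy, hlt]
      by_cases hp : p x
      · rw [if_pos hp, h1, hfront, List.filter_cons]
        simp [hp]
      · rw [if_neg hp, h1, List.filter_cons]
        simp [hp]
    · have ihy := ih hys
      by_cases hp : p x <;> by_cases hpy : p y <;>
        simp [PySem.List.insertBy, hlt, hp, hpy, ihy]

lemma insertBy_map_snd (x : String × String × Int) (acc : List (String × String × Int)) :
    (PySem.List.insertBy (fun a b => decide (a.2.2 < b.2.2)) x acc).map (fun y => y.2)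
      = PySem.List.insertBy (fun a b => decide (a.2 < b.2)) x.2 (acc.map (fun y => y.2)) := by
  induction acc with
  | nil => rfl
  | cons y ys ih =>
    by_cases h : x.2.2 < y.2.2 <;> simp [PySem.List.insertBy, h, ih]

-- B's family fold = map-snd of (filter of A's stable sort)
lemma fam_main (rb : List String) (items : List (String × String × Int)) :
    items.foldl (fun acc it => if rb.contains it.1 then acc else pvInsortB it.2 acc) []
      = ((PySem.List.sorted items (fun x => x.2.2) false).filter
          (fun x => !(rb.contains x.1))).map (fun y => y.2) := by
  induction items using List.reverseRecOn with
  | nil => rfl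
  | append_singleton xs x ih =>
    rw [List.foldl_append, sorted_eq_foldl, List.foldl_append, ← sorted_eq_foldl]
    simp only [List.foldl_cons, List.foldl_nil]
    rw [insertBy_filter (fun z => z.2.2) _ x _
          (PySem.List.sorted_pairwise xs (fun z => z.2.2)), ih]
    by_cases hc : x.1 ∈ rb
    · simp [hc]
    · simp [hc, pvInsortB_eq, insertBy_map_snd]

-- B's subfamily fold = A's stable sort of the looked-up pairs
lemma sub_main (d : PySem.Dict String (String × Int)) (rb : List String) :
    rb.foldl (fun acc ax => match d.get? ax with | some v => pvInsortB v acc | none => acc) []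
      = PySem.List.sorted (rb.filterMap (fun ax => d.get? ax)) (fun x => x.2) false := by
  rw [sorted_eq_foldl]
  simp only [pvInsortB_eq]
  have main : ∀ (l : List String) (acc : List (String × Int)),
      l.foldl (fun acc ax => match d.get? ax with
          | some v => PySem.List.insertBy (fun a b => decide (a.2 < b.2)) v acc
          | none => acc) acc
        = (l.filterMap (fun ax => d.get? ax)).foldl
            (fun acc x => PySem.List.insertBy (fun a b => decide (a.2 < b.2)) x acc) acc := by
    intro l
    induction l with
    | nil => intro acc; rfl
    | cons a l ih =>
      intro acc
      cases h : d.get? a <;> simp [h, ih]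
  exact main rb []

-- ===== VERDICT (by name: the statement is the Claim_ definition above) =====
theorem compute_rbiz_names_spec : Claim_equal_compute_rbiz_names := by
  intro family stat_names rbiz_axes _
  unfold Spec_compute_rbiz_names compute_rbiz_names compute_rbiz_names_alt
  simp only [fam_main rbiz_axes, sub_main, List.map_map, Function.comp_def]
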